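-- pv_equiv track=rewrite | github.com/shashank231/imp-my-prep | package_1/best_time_to_sell_stock_both_parts.py | largetElementOnRight
-- ===== SOURCE A (Python) =====
-- def largetElementOnRight(arr):
--     largestTillNow = -1
--     lenArr = len(arr)
--
--     largestOnRight = list()
--     lastIndex = lenArr-1
--
--     for i in range(lastIndex, -1, -1):
--         if i == lastIndex:
--             largestOnRight.append(-1)
--             largestTillNow = arr[lastIndex]
--         else:
--             currEle = arr[i]
--             if currEle > largestTillNow:
--                 largestTillNow = currEle
--                 largestOnRight.append(-1)
--             else:
--                 largestOnRight.append(largestTillNow)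
--
--     largestOnRight.reverse()
--     return largestOnRight
-- ===== SOURCE B (Python) =====
-- def largetElementOnRight(arr):
--     # Brute force: for each position, rescan the suffix to its right with max().
--     n = len(arr)
--     res = []
--     for i in range(n):
--         if i == n - 1:
--             res.append(-1)
--         else:
--             m = max(arr[i+1:])
--             res.append(-1 if arr[i] > m else m)
--     return res
-- ===== Notes on version B (the rewrite author's own statement) =====
-- stated objective: alternative
-- what changed: Replaced A's backward index loop with a maintained running maximum, appended output and final reverse by a forward brute-force scan that recomputes max(arr[i+1:]) for each position and builds the output front-to-back; it trades A's O(n) single pass for a plainer quadratic rescan.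
import Mathlib
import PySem

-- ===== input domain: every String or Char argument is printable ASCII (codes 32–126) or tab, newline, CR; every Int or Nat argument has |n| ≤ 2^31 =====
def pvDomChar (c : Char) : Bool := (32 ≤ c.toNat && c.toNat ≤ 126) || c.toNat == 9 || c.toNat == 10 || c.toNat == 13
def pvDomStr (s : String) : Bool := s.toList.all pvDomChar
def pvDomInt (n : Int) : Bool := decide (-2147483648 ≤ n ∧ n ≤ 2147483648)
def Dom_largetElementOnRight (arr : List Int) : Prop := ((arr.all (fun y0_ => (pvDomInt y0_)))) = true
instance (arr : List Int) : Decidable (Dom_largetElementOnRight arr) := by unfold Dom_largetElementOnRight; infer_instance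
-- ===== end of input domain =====

-- B replaces A's single backward pass with a maintained running maximum (append + final
-- reverse) by a forward brute-force scan that recomputes max(arr[i+1:]) for each position
-- ('alternative' objective: plainer but quadratic, not faster).

-- ===== PORT A =====
-- backward index loop with running max, appending then reversing; indices are always
-- in range, so '.getD 0' after pyGet? never supplies its default
def largetElementOnRight (arr : List Int) : List Int :=
  let lastIndex : Int := (arr.length : Int) - 1
  let st : Int × List Int :=
    (PySem.List.pyRange lastIndex (-1) (-1)).foldl
      (fun st i =>
        if i = lastIndex then
          ((PySem.List.pyGet? arr lastIndex).getD 0, st.2 ++ [(-1 : Int)])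
        else
          let currEle := (PySem.List.pyGet? arr i).getD 0
          if currEle > st.1 then (currEle, st.2 ++ [(-1 : Int)])
          else (st.1, st.2 ++ [st.1]))
      (-1, [])
  st.2.reverse

-- ===== PORT B =====
-- forward loop; the sliced suffix is nonempty whenever max is taken (i < n-1) and i is
-- always in range, so the '.getD 0's never supply their defaults
def largetElementOnRight_alt (arr : List Int) : List Int :=
  (PySem.List.pyRange 0 (arr.length : Int) 1).foldl
    (fun res i =>
      if i = (arr.length : Int) - 1 then res ++ [(-1 : Int)]
      else
        let m := (PySem.List.max? (PySem.List.slice arr (some (i + 1)) none)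
                    (fun y => y)).getD 0
        res ++ [if (PySem.List.pyGet? arr i).getD 0 > m then (-1 : Int) else m])
    []

-- ===== PRECONDITION & SPEC =====
def Spec_largetElementOnRight (arr : List Int) (out : List Int) : Prop := out = largetElementOnRight_alt arr
instance (arr : List Int) (out : List Int) : Decidable (Spec_largetElementOnRight arr out) := by unfold Spec_largetElementOnRight; infer_instance

-- ===== CLAIM (what is proved, stated in full; the proofs are below) =====
def Claim_equal_largetElementOnRight : Prop := ∀ (arr : List Int), Dom_largetElementOnRight arr → Spec_largetElementOnRight arr (largetElementOnRight arr)

-- ===== LEMMAS AND PROOFS =====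

-- the maximum of a nonempty list, as a fold
def pvMaxHead : List Int → Int
  | [] => -1
  | x :: xs => xs.foldl max x

-- common specification both ports are reduced to: head recursion on the list
def pvG : List Int → List Int
  | [] => []
  | x :: rest =>
    if rest.isEmpty then [(-1 : Int)]
    else
      let m := pvMaxHead rest
      (if x > m then (-1 : Int) else m) :: pvG rest

lemma pvFoldlMax (xs : List Int) : ∀ (a b : Int), xs.foldl max (max a b) = max a (xs.foldl max b) := by
  induction xs with
  | nil => intro a b; rfl
  | cons y ys ih =>
      intro a b
      simp only [List.foldl_cons, max_assoc]
      exact ih a (max b y)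

lemma pvMaxHead_cons (x y : Int) (ys : List Int) :
    pvMaxHead (x :: y :: ys) = max x (pvMaxHead (y :: ys)) := by
  simp only [pvMaxHead, List.foldl_cons]
  exact pvFoldlMax ys x y

-- PySem.List.max? with identity key computes the fold-max
lemma pvMax?_eq (xs : List Int) : ∀ (a : Int),
    PySem.List.max? (a :: xs) (fun y => y) = some (xs.foldl max a) := by
  induction xs with
  | nil => intro a; rfl
  | cons y ys ih =>
      intro a
      have h1 : PySem.List.max? (a :: y :: ys) (fun y => y)
          = PySem.List.max? (max a y :: ys) (fun y => y) := by
        simp only [PySem.List.max?, List.foldl_cons]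
        congr 1
        by_cases h : a < y
        · simp [h, max_eq_right (le_of_lt h)]
        · simp [h, max_eq_left (not_lt.mp h)]
      rw [h1, ih (max a y)]
      simp [List.foldl_cons]

lemma pvMax?_getD (x : Int) (xs : List Int) :
    (PySem.List.max? (x :: xs) (fun y => y)).getD 0 = pvMaxHead (x :: xs) := by
  rw [pvMax?_eq xs x]; rfl

lemma pvG_cons (x y : Int) (ys : List Int) :
    pvG (x :: y :: ys)
      = (if x > pvMaxHead (y :: ys) then (-1 : Int) else pvMaxHead (y :: ys))
          :: pvG (y :: ys) := by
  simp only [pvG, List.isEmpty_cons, Bool.false_eq_true, if_false]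

-- ---------- A's fold equals pvG ----------

-- the loop body of A's fold
def pvBody (arr : List Int) (st : Int × List Int) (i : Int) : Int × List Int :=
  if i = (arr.length : Int) - 1 then
    ((PySem.List.pyGet? arr ((arr.length : Int) - 1)).getD 0, st.2 ++ [(-1 : Int)])
  else
    let currEle := (PySem.List.pyGet? arr i).getD 0
    if currEle > st.1 then (currEle, st.2 ++ [(-1 : Int)])
    else (st.1, st.2 ++ [st.1])

lemma pvBody_shift (x : Int) (xs : List Int) (hxs : xs ≠ []) (st : Int × List Int) (i : Int)
    (hi : 0 ≤ i) : pvBody (x :: xs) st (i + 1) = pvBody xs st i := by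
  have hlen : ((x :: xs).length : Int) - 1 = ((xs.length : Int) - 1) + 1 := by
    push_cast [List.length_cons]; ring
  have h0 : (0 : Int) ≤ (xs.length : Int) - 1 := by
    cases xs with
    | nil => exact absurd rfl hxs
    | cons _ _ => push_cast [List.length_cons]; omega
  have hidx : PySem.List.pyGet? (x :: xs) (i + 1) = PySem.List.pyGet? xs i := by
    rw [PySem.List.pyGet?_of_nonneg _ (by omega : (0:Int) ≤ i + 1),
        PySem.List.pyGet?_of_nonneg _ hi]
    have h : (i + 1).toNat = i.toNat + 1 := by omega
    rw [h]; simp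
  have hlast : PySem.List.pyGet? (x :: xs) (((xs.length : Int) - 1) + 1)
      = PySem.List.pyGet? xs ((xs.length : Int) - 1) := by
    rw [PySem.List.pyGet?_of_nonneg _ (by omega : (0:Int) ≤ ((xs.length : Int) - 1) + 1),
        PySem.List.pyGet?_of_nonneg _ h0]
    have h : ((xs.length : Int) - 1 + 1).toNat = ((xs.length : Int) - 1).toNat + 1 := by omega
    rw [h]; simp
  simp only [pvBody, hlen, hidx, hlast, add_left_inj]

-- A's descending range, split as the shifted range of the tail followed by index 0
lemma pvRange_desc_split (m : Nat) :
    PySem.List.pyRange ((m : Int) + 1) (-1) (-1)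
      = (PySem.List.pyRange (m : Int) (-1) (-1)).map (· + 1) ++ [(0 : Int)] := by
  rw [PySem.List.pyRange_neg_one, PySem.List.pyRange_neg_one]
  have h1 : ((m : Int) + 1 - (-1)).toNat = (m + 1) + 1 := by omega
  have h2 : ((m : Int) - (-1)).toNat = m + 1 := by omega
  rw [h1, h2, List.range_succ, List.map_append, List.map_map]
  congr 1
  · apply List.map_congr_left
    intro k hk
    simp only [Function.comp]
    omega
  · simp

-- the heart of the A side: A's fold computes (max of arr, reversed pvG-output)
lemma pvFoldA : ∀ (arr : List Int), arr ≠ [] →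
    (PySem.List.pyRange ((arr.length : Int) - 1) (-1) (-1)).foldl (pvBody arr) (-1, [])
      = (pvMaxHead arr, (pvG arr).reverse) := by
  intro arr
  induction arr with
  | nil => intro h; exact absurd rfl h
  | cons x xs ih =>
      intro _
      cases xs with
      | nil =>
          have hr : PySem.List.pyRange (((([x] : List Int)).length : Int) - 1) (-1) (-1)
              = [(0 : Int)] := by
            simp [PySem.List.pyRange_neg_one]
          rw [hr]
          simp [pvBody, pvMaxHead, pvG]
      | cons y ys =>
          have hxs : (y :: ys) ≠ [] := by simp
          have hlen : (((x :: y :: ys).length : Int) - 1)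
              = ((((y :: ys).length - 1 : Nat)) : Int) + 1 := by
            push_cast [List.length_cons]; omega
          rw [hlen, pvRange_desc_split, List.foldl_append, List.foldl_map]
          have hfold :
              List.foldl (fun st i => pvBody (x :: y :: ys) st (i + 1)) ((-1 : Int), ([] : List Int))
                (PySem.List.pyRange ((((y :: ys).length - 1 : Nat)) : Int) (-1) (-1))
              = List.foldl (pvBody (y :: ys)) ((-1 : Int), ([] : List Int))
                (PySem.List.pyRange ((((y :: ys).length - 1 : Nat)) : Int) (-1) (-1)) := by
            apply PySem.List.foldl_congr_mem
            intro st i hi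
            rw [PySem.List.mem_pyRange_neg_one] at hi
            exact pvBody_shift x (y :: ys) hxs st i (by omega)
          rw [hfold]
          have hlen2 : ((((y :: ys).length - 1 : Nat)) : Int) = (((y :: ys).length : Int) - 1) := by
            push_cast [List.length_cons]; omega
          rw [hlen2, ih hxs]
          -- final iteration: index 0
          have h0ne : (0 : Int) ≠ ((x :: y :: ys).length : Int) - 1 := by
            push_cast [List.length_cons]; omega
          simp only [List.foldl_cons, List.foldl_nil, pvBody, if_neg h0ne]
          have hget0 : (PySem.List.pyGet? (x :: y :: ys) 0).getD 0 = x := by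
            rw [PySem.List.pyGet?_zero_cons]; rfl
          rw [hget0, pvG_cons, pvMaxHead_cons]
          by_cases hx : x > pvMaxHead (y :: ys)
          · rw [if_pos hx, if_pos hx, max_eq_left (le_of_lt hx)]
            simp
          · rw [if_neg hx, if_neg hx, max_eq_right (not_lt.mp hx)]
            simp

-- ---------- B's fold equals pvG ----------

-- the per-index entry B appends
def pvF (arr : List Int) (i : Int) : Int :=
  if i = (arr.length : Int) - 1 then (-1 : Int)
  else
    let m := (PySem.List.max? (PySem.List.slice arr (some (i + 1)) none) (fun y => y)).getD 0
    if (PySem.List.pyGet? arr i).getD 0 > m then (-1 : Int) else m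

-- B's fold only ever appends one entry, so it is an accumulator-prefixed map
lemma pvFoldB_map (arr : List Int) : ∀ (L : List Int) (res : List Int),
    L.foldl
      (fun res i =>
        if i = (arr.length : Int) - 1 then res ++ [(-1 : Int)]
        else
          let m := (PySem.List.max? (PySem.List.slice arr (some (i + 1)) none)
                      (fun y => y)).getD 0
          res ++ [if (PySem.List.pyGet? arr i).getD 0 > m then (-1 : Int) else m]) res
    = res ++ L.map (pvF arr) := by
  intro L
  induction L with
  | nil => intro res; simp
  | cons i L ih =>
      intro res
      have hstep :
          (if i = (arr.length : Int) - 1 then res ++ [(-1 : Int)]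
           else
             let m := (PySem.List.max? (PySem.List.slice arr (some (i + 1)) none)
                         (fun y => y)).getD 0
             res ++ [if (PySem.List.pyGet? arr i).getD 0 > m then (-1 : Int) else m])
          = res ++ [pvF arr i] := by
        by_cases h : i = (arr.length : Int) - 1
        · simp [pvF, h]
        · simp [pvF, h]
      simp only [List.foldl_cons, hstep, ih, List.map_cons, List.append_assoc,
        List.singleton_append]

lemma pvF_shift (x : Int) (xs : List Int) (i : Int) (hi : 0 ≤ i) :
    pvF (x :: xs) (i + 1) = pvF xs i := by
  have hlen : ((x :: xs).length : Int) - 1 = ((xs.length : Int) - 1) + 1 := by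
    push_cast [List.length_cons]; ring
  have hidx : PySem.List.pyGet? (x :: xs) (i + 1) = PySem.List.pyGet? xs i := by
    rw [PySem.List.pyGet?_of_nonneg _ (by omega : (0:Int) ≤ i + 1),
        PySem.List.pyGet?_of_nonneg _ hi]
    have h : (i + 1).toNat = i.toNat + 1 := by omega
    rw [h]; simp
  have hslice : PySem.List.slice (x :: xs) (some (i + 1 + 1)) none
      = PySem.List.slice xs (some (i + 1)) none := by
    have h1 : i + 1 + 1 = ((i.toNat + 2 : Nat) : Int) := by omega
    have h2 : i + 1 = ((i.toNat + 1 : Nat) : Int) := by omega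
    rw [h1, h2, PySem.List.slice_from_natCast, PySem.List.slice_from_natCast]
    simp [List.drop_succ_cons]
  simp only [pvF, hlen, hidx, hslice, add_left_inj]

-- B's ascending range, split as index 0 followed by the shifted range of the tail
lemma pvRange_asc_split (m : Nat) :
    PySem.List.pyRange 0 ((m : Int) + 1) 1
      = (0 : Int) :: (PySem.List.pyRange 0 (m : Int) 1).map (· + 1) := by
  rw [PySem.List.pyRange_one_cons (by omega : (0:Int) < (m : Int) + 1),
      PySem.List.pyRange_one, PySem.List.pyRange_one]
  have h1 : ((m : Int) + 1 - (0 + 1)).toNat = m := by omega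
  have h2 : ((m : Int) - 0).toNat = m := by omega
  rw [h1, h2, List.map_map]
  congr 1
  apply List.map_congr_left
  intro k hk
  simp only [Function.comp]
  omega

-- the heart of the B side: B's entry map computes pvG
lemma pvMapB : ∀ (arr : List Int),
    (PySem.List.pyRange 0 (arr.length : Int) 1).map (pvF arr) = pvG arr := by
  intro arr
  induction arr with
  | nil => simp [PySem.List.pyRange_one_eq_nil, pvG]
  | cons x xs ih =>
      have hlen : ((x :: xs).length : Int) = ((xs.length : Nat) : Int) + 1 := by
        push_cast [List.length_cons]; ring
      rw [hlen, pvRange_asc_split, List.map_cons, List.map_map]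
      have htail : (PySem.List.pyRange 0 ((xs.length : Nat) : Int) 1).map (pvF (x :: xs) ∘ (· + 1))
          = pvG xs := by
        rw [← ih]
        apply List.map_congr_left
        intro i hi
        rw [PySem.List.mem_pyRange_one] at hi
        exact pvF_shift x xs i hi.1
      rw [htail]
      cases xs with
      | nil => simp [pvF, pvG]
      | cons y ys =>
          have h0ne : (0 : Int) ≠ ((x :: y :: ys).length : Int) - 1 := by
            push_cast [List.length_cons]; omega
          have hslice : PySem.List.slice (x :: y :: ys) (some ((0 : Int) + 1)) none
              = y :: ys := by
            have h1 : (0 : Int) + 1 = ((1 : Nat) : Int) := by omega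
            rw [h1, PySem.List.slice_from_natCast]
            simp
          rw [pvG_cons]
          simp only [pvF, if_neg h0ne, hslice, pvMax?_getD, PySem.List.pyGet?_zero_cons,
            Option.getD_some]

-- ===== VERDICT (by name: the statement is the Claim_ definition above) =====
theorem largetElementOnRight_spec : Claim_equal_largetElementOnRight := by
  unfold Claim_equal_largetElementOnRight Spec_largetElementOnRight
  intro arr _
  have hB : largetElementOnRight_alt arr = pvG arr := by
    show (PySem.List.pyRange 0 (arr.length : Int) 1).foldl _ [] = pvG arr
    rw [pvFoldB_map arr, List.nil_append, pvMapB]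
  rw [hB]
  cases arr with
  | nil => rfl
  | cons x xs =>
      have h := pvFoldA (x :: xs) (by simp)
      show (((PySem.List.pyRange (((x :: xs).length : Int) - 1) (-1) (-1)).foldl
              (pvBody (x :: xs)) (-1, [])).2).reverse = pvG (x :: xs)
      rw [h]
      simp
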